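-- pv_equiv track=rewrite | github.com/Ruchi2613/Leetcode | delte_dll.py | k_subarray_sum
-- ===== SOURCE A (Python) =====
-- def k_subarray_sum(arr, k):
--     subarray_sums = []
--
--     # Initialize pointers and variables
--     current_sum = 0
--     left = 0
--
--     # Traverse the array with the right pointer
--     for right in range(len(arr)):
--         # Add the current element to the sum
--         current_sum += arr[right]
--
--         # When the window size reaches k
--         if right - left + 1 == k:
--             # Append the current sum to the results list
--             subarray_sums.append(current_sum)
--             # Subtract the element that is sliding out of the window
--             current_sum -= arr[left]
--             # Move the left pointer
--             left += 1
--
--     return subarray_sums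
-- ===== SOURCE B (Python) =====
-- def k_subarray_sum(arr, k):
--     if k < 1:
--         return []
--     prefix = [0]
--     for x in arr:
--         prefix.append(prefix[-1] + x)
--     result = []
--     for i in range(len(arr) - k + 1):
--         result.append(prefix[i + k] - prefix[i])
--     return result
-- ===== Notes on version B (the rewrite author's own statement) =====
-- stated objective: alternative
-- what changed: Replaces the incremental sliding window (add right element, subtract left element, move two pointers) by a two-phase prefix-sum table: one accumulation pass builds prefix, then each window sum is the indexed difference prefix[i+k]-prefix[i].
import Mathlib
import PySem

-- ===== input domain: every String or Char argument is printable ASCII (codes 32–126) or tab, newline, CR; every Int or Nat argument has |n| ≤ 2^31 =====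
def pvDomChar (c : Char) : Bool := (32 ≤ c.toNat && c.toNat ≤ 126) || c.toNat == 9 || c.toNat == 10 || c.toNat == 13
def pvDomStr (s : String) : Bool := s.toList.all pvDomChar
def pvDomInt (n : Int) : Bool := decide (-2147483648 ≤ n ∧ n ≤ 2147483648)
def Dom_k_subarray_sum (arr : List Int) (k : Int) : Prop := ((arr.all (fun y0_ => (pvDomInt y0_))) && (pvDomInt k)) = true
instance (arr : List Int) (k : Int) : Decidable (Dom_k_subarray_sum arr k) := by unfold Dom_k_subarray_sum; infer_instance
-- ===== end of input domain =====

-- B replaces A's incremental sliding window (two pointers, add new element / subtract old)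
-- by a two-phase prefix-sum table with indexed differences; same return value, no mutation.

-- ===== PORT A =====
def k_subarray_sum (arr : List Int) (k : Int) : List Int :=
  ((PySem.List.pyRange 0 (arr.length : Int) 1).foldl
    (fun (s : List Int × Int × Int) right =>
      -- s = (subarray_sums, current_sum, left); arr[right] / arr[left] are always in range
      let currentSum := s.2.1 + PySem.List.pyGetD arr right 0
      if right - s.2.2 + 1 = k then
        (s.1 ++ [currentSum], currentSum - PySem.List.pyGetD arr s.2.2 0, s.2.2 + 1)
      else
        (s.1, currentSum, s.2.2))
    ([], 0, 0)).1

-- ===== PORT B =====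
def k_subarray_sum_alt (arr : List Int) (k : Int) : List Int :=
  if k < 1 then []
  else
    let pre := arr.foldl (fun p x => p ++ [PySem.List.pyGetD p (-1) 0 + x]) [0]
    (PySem.List.pyRange 0 ((arr.length : Int) - k + 1) 1).foldl
      (fun res i => res ++ [PySem.List.pyGetD pre (i + k) 0 - PySem.List.pyGetD pre i 0]) []

-- ===== PRECONDITION & SPEC =====
def Spec_k_subarray_sum (arr : List Int) (k : Int) (out : List Int) : Prop := out = k_subarray_sum_alt arr k
instance (arr : List Int) (k : Int) (out : List Int) : Decidable (Spec_k_subarray_sum arr k out) := by unfold Spec_k_subarray_sum; infer_instance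

-- ===== CLAIM (what is proved, stated in full; the proofs are below) =====
def Claim_equal_k_subarray_sum : Prop := ∀ (arr : List Int) (k : Int), Dom_k_subarray_sum arr k → Spec_k_subarray_sum arr k (k_subarray_sum arr k)

-- ===== LEMMAS AND PROOFS =====

-- prefix sum of the first i elements
def pvP (arr : List Int) (i : Nat) : Int := (arr.take i).sum

lemma pvP_succ (arr : List Int) (i : Nat) (h : i < arr.length) :
    pvP arr (i + 1) = pvP arr i + arr[i] := by
  simp [pvP, List.sum_take_succ arr i h]

-- B's prefix-building fold, characterised for any nonempty accumulator
lemma pvPrefix_build (l : List Int) (p : List Int) (s : Int) (h : p.getLast? = some s) :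
    l.foldl (fun p x => p ++ [PySem.List.pyGetD p (-1) 0 + x]) p
      = p ++ (List.range l.length).map (fun i => s + (l.take (i + 1)).sum) := by
  induction l generalizing p s with
  | nil => simp
  | cons x t ih =>
    have hp : p ≠ [] := by intro h'; simp [h'] at h
    have hlast : PySem.List.pyGetD p (-1) 0 = s := by
      rw [PySem.List.pyGetD_neg_one p 0 hp]
      rw [List.getLast?_eq_some_getLast hp] at h
      exact Option.some_injective _ h
    simp only [List.foldl_cons, hlast]
    rw [ih (p ++ [s + x]) (s + x) (by simp)]
    simp [List.range_succ_eq_map, List.map_map, Function.comp, add_assoc]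

-- the prefix table B builds IS the table of prefix sums
lemma pvPrefix_eq (arr : List Int) :
    arr.foldl (fun p x => p ++ [PySem.List.pyGetD p (-1) 0 + x]) [0]
      = (List.range (arr.length + 1)).map (pvP arr) := by
  rw [pvPrefix_build arr [0] 0 rfl]
  simp [List.range_succ_eq_map, List.map_map, Function.comp, pvP]

-- A's loop invariant for k ≥ 1: after r steps the state is
-- (the first r+1-k window sums, sum arr[left..r-1], left) with left = r+1-k clamped at 0
lemma pvA_inv (arr : List Int) (k : Int) (hk : 1 ≤ k) (r : Nat) (hr : r ≤ arr.length) :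
    (PySem.List.pyRange 0 (r : Int) 1).foldl
      (fun (s : List Int × Int × Int) right =>
        let currentSum := s.2.1 + PySem.List.pyGetD arr right 0
        if right - s.2.2 + 1 = k then
          (s.1 ++ [currentSum], currentSum - PySem.List.pyGetD arr s.2.2 0, s.2.2 + 1)
        else
          (s.1, currentSum, s.2.2))
      ([], 0, 0)
    = ((List.range (r + 1 - k.toNat)).map (fun j => pvP arr (j + k.toNat) - pvP arr j),
       pvP arr r - pvP arr (r + 1 - k.toNat), ((r + 1 - k.toNat : Nat) : Int)) := by
  induction r with
  | zero =>
    have : 1 - k.toNat = 0 := by omega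
    simp [this, pvP, PySem.List.pyRange_one_eq_nil]
  | succ r ih =>
    have hr' : r ≤ arr.length := by omega
    have hrlt : r < arr.length := by omega
    have hcast : ((r + 1 : Nat) : Int) = (r : Int) + 1 := by push_cast; ring
    rw [hcast, PySem.List.pyRange_one_succ_right (by positivity), List.foldl_append, ih hr']
    simp only [List.foldl_cons, List.foldl_nil]
    have hget : PySem.List.pyGetD arr (r : Int) 0 = arr[r] := by
      simp [PySem.List.pyGetD_natCast, List.getD_eq_getElem?_getD, hrlt]
    have hcur : pvP arr r - pvP arr (r + 1 - k.toNat) + PySem.List.pyGetD arr (r : Int) 0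
        = pvP arr (r + 1) - pvP arr (r + 1 - k.toNat) := by
      rw [hget, pvP_succ arr r hrlt]; ring
    by_cases hc : (k.toNat ≤ r + 1)
    · have hif : ((r : Int) - ((r + 1 - k.toNat : Nat) : Int) + 1 = k) := by
        have : (k.toNat : Int) = k := Int.toNat_of_nonneg (by omega)
        omega
      simp only [hcur, hif, if_pos]
      have hL : r + 1 - k.toNat < arr.length := by omega
      have hgetL : PySem.List.pyGetD arr ((r + 1 - k.toNat : Nat) : Int) 0 = arr[r + 1 - k.toNat] := by
        simp [PySem.List.pyGetD_natCast, List.getD_eq_getElem?_getD, hL]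
      refine Prod.ext ?_ (Prod.ext ?_ ?_) <;> simp only
      · rw [show r + 1 + 1 - k.toNat = (r + 1 - k.toNat) + 1 by omega, List.range_succ,
          List.map_append]
        simp only [List.map_cons, List.map_nil, List.append_cancel_left_eq, List.cons.injEq, and_true]
        congr 2
        omega
      · rw [hgetL, show r + 1 + 1 - k.toNat = (r + 1 - k.toNat) + 1 by omega,
          pvP_succ arr (r + 1 - k.toNat) hL]; ring
      · have : r + 1 + 1 - k.toNat = (r + 1 - k.toNat) + 1 := by omega
        rw [this]; push_cast; ring
    · have h0 : r + 1 - k.toNat = 0 := by omega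
      have h0' : r + 1 + 1 - k.toNat = 0 := by omega
      simp only [h0, h0', Nat.cast_zero]
      rw [if_neg (by omega)]
      refine Prod.ext rfl (Prod.ext ?_ rfl)
      simp only
      rw [hget, pvP_succ arr r hrlt]
      ring

-- A's loop invariant for k < 1: the window-size test never fires
lemma pvA_inv_neg (arr : List Int) (k : Int) (hk : k < 1) (r : Nat) (hr : r ≤ arr.length) :
    (PySem.List.pyRange 0 (r : Int) 1).foldl
      (fun (s : List Int × Int × Int) right =>
        let currentSum := s.2.1 + PySem.List.pyGetD arr right 0
        if right - s.2.2 + 1 = k then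
          (s.1 ++ [currentSum], currentSum - PySem.List.pyGetD arr s.2.2 0, s.2.2 + 1)
        else
          (s.1, currentSum, s.2.2))
      ([], 0, 0)
    = ([], pvP arr r, 0) := by
  induction r with
  | zero => simp [PySem.List.pyRange_one_eq_nil, pvP]
  | succ r ih =>
    have hrlt : r < arr.length := by omega
    have hcast : ((r + 1 : Nat) : Int) = (r : Int) + 1 := by push_cast; ring
    rw [hcast, PySem.List.pyRange_one_succ_right (by positivity), List.foldl_append, ih (by omega)]
    simp only [List.foldl_cons, List.foldl_nil]
    rw [if_neg (by omega)]
    have hget : PySem.List.pyGetD arr (r : Int) 0 = arr[r] := by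
      simp [PySem.List.pyGetD_natCast, List.getD_eq_getElem?_getD, hrlt]
    rw [hget]
    simp [pvP, List.sum_take_succ arr r hrlt]

-- B's result, characterised as the table of prefix-sum differences
lemma pvB_eq (arr : List Int) (k : Int) (hk : 1 ≤ k) :
    k_subarray_sum_alt arr k
      = (List.range (arr.length + 1 - k.toNat)).map
          (fun j => pvP arr (j + k.toNat) - pvP arr j) := by
  unfold k_subarray_sum_alt
  rw [if_neg (by omega), pvPrefix_eq]
  rw [PySem.List.foldl_append_singleton_eq_map]
  rw [PySem.List.pyRange_one]
  rw [show ((arr.length : Int) - k + 1 - 0).toNat = arr.length + 1 - k.toNat by omega]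
  rw [List.map_map]
  apply List.map_congr_left
  intro j hj
  rw [List.mem_range] at hj
  have hkk : (k.toNat : Int) = k := Int.toNat_of_nonneg (by omega)
  simp only [Function.comp, zero_add]
  rw [show (j : Int) + k = ((j + k.toNat : Nat) : Int) by push_cast; omega]
  rw [PySem.List.pyGetD_natCast, PySem.List.pyGetD_natCast,
      PySem.List.getD_map_range _ _ _ _ (by omega),
      PySem.List.getD_map_range _ _ _ _ (by omega)]

-- ===== VERDICT (by name: the statement is the Claim_ definition above) =====
theorem k_subarray_sum_spec : Claim_equal_k_subarray_sum := by
  intro arr k _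
  unfold Spec_k_subarray_sum k_subarray_sum
  by_cases hk : k < 1
  · rw [pvA_inv_neg arr k hk arr.length le_rfl]
    unfold k_subarray_sum_alt
    rw [if_pos hk]
  · rw [pvA_inv arr k (by omega) arr.length le_rfl, pvB_eq arr k (by omega)]
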